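-- pv_equiv track=rewrite | github.com/yutakoike0523/paiza_skillcheck_python | b109.py | find_best_seat
-- ===== SOURCE A (Python) =====
-- import heapq
--
-- def find_best_seat(num_rows, num_cols, reserved_seats):
--     reserved = set((r-1, c-1) for r, c in reserved_seats)
--
--     heap = []
--
--     for r in range(num_rows):
--         for c in range(num_cols):
--
--             if (r, c) in reserved:
--                 continue
--             # (r,c)の座席の評価値を計算する
--             value = abs(r - num_rows // 2) + abs(c - num_cols // 2)
--             # ヒープに評価値と席の位置を追加する
--             heapq.heappush(heap, (value, r, c))
--
--     # 評価値が最小の席のリストを初期化する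
--     best_seats = []
--
--     # 評価値が最小の席を探す
--     while len(best_seats) < 3 and heap:
--         _, r, c = heapq.heappop(heap)
--         best_seats.append((r, c))
--
--     # 最も映画を見やすい席を返す
--     return [(r+1, c+1) for r, c in best_seats]
-- ===== SOURCE B (Python) =====
-- def find_best_seat(num_rows, num_cols, reserved_seats):
--     if num_rows <= 0 or num_cols <= 0:
--         return []
--     reserved = set((r - 1, c - 1) for r, c in reserved_seats)
--     cr, cc = num_rows // 2, num_cols // 2
--     max_d = max(cr, num_rows - 1 - cr) + max(cc, num_cols - 1 - cc)
--     best = []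
--     d = 0
--     while d <= max_d and len(best) < 3:
--         for r in range(max(0, cr - d), min(num_rows - 1, cr + d) + 1):
--             k = d - abs(r - cr)
--             for c in ([cc - k, cc + k] if k > 0 else [cc]):
--                 if 0 <= c < num_cols and (r, c) not in reserved:
--                     best.append((r + 1, c + 1))
--         d += 1
--     return best[:3]
-- ===== Notes on version B (the rewrite author's own statement) =====
-- stated objective: faster
-- what changed: Replaces A's build-a-heap-of-every-free-seat-then-pop-3 with an outward walk over Manhattan-distance shells around the centre seat that emits seats in (distance, row, col) order and stops as soon as 3 free seats are collected.
import Mathlib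
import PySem

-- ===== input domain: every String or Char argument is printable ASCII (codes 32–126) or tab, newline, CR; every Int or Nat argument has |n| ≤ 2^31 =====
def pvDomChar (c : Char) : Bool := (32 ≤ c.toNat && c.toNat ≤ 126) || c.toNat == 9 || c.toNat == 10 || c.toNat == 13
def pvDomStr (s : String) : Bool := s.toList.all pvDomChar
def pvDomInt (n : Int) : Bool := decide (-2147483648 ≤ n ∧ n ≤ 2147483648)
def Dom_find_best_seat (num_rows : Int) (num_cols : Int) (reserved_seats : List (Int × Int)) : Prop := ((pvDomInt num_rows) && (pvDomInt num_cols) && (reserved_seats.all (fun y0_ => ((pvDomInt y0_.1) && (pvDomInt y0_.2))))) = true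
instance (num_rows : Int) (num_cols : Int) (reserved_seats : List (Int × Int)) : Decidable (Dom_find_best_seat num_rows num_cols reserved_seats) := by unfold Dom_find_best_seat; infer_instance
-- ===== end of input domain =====

-- B replaces A's build-a-heap-of-all-seats-and-pop-3 with an outward walk over
-- Manhattan-distance shells around the centre that stops as soon as 3 free seats
-- are found (objective: faster — it never touches seats beyond the needed shells).

-- ===== PORT A =====

-- Python tuple comparison on (value, r, c): lexicographic.
def pvLexLt (a b : Int × Int × Int) : Bool :=
  decide (a.1 < b.1 ∨ (a.1 = b.1 ∧ (a.2.1 < b.2.1 ∨ (a.2.1 = b.2.1 ∧ a.2.2 < b.2.2))))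

-- heapq is modeled by its priority-queue contract: heappush appends, heappop
-- yields the smallest tuple (Python tuple order) and removes one occurrence of
-- it.  This is value-exact for A's use of heapq.
def pvHeapPop (h : List (Int × Int × Int)) :
    Option ((Int × Int × Int) × List (Int × Int × Int)) :=
  match h with
  | [] => none
  | x :: xs =>
    let m := xs.foldl (fun m y => if pvLexLt y m then y else m) x
    some (m, h.erase m)

-- the 'while len(best_seats) < 3 and heap:' loop; each pass appends one seat to
-- best_seats, so fuel 3 is exact (the loop body never runs a 4th time).
def pvPopLoop : Nat → List (Int × Int) → List (Int × Int × Int) → List (Int × Int)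
  | 0, best, _ => best
  | f + 1, best, heap =>
    if best.length < 3 then
      match pvHeapPop heap with
      | none => best
      | some (m, rest) => pvPopLoop f (best ++ [(m.2.1, m.2.2)]) rest
    else best

def find_best_seat (num_rows : Int) (num_cols : Int) (reserved_seats : List (Int × Int)) : List (Int × Int) :=
  let reserved : PySem.Set (Int × Int) :=
    PySem.Set.ofList (reserved_seats.map (fun rc => (rc.1 - 1, rc.2 - 1)))
  let heap : List (Int × Int × Int) :=
    (PySem.List.pyRange 0 num_rows 1).foldl (fun heap r =>
      (PySem.List.pyRange 0 num_cols 1).foldl (fun heap c =>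
        if PySem.Set.contains reserved (r, c) then heap
        else heap ++ [(|r - PySem.Int.floordiv num_rows 2| + |c - PySem.Int.floordiv num_cols 2|, r, c)]) heap) []
  let best_seats := pvPopLoop 3 [] heap
  best_seats.map (fun rc => (rc.1 + 1, rc.2 + 1))

-- ===== PORT B =====

-- the 'while d <= max_d and len(best) < 3:' loop of Source B; d starts at 0 and is
-- incremented each pass, so fuel (max_d + 1).toNat is exact.
def pvShellLoop (num_rows num_cols cr cc max_d : Int) (reserved : PySem.Set (Int × Int)) :
    Nat → Int → List (Int × Int) → List (Int × Int)
  | 0, _, best => best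
  | f + 1, d, best =>
    if d ≤ max_d ∧ best.length < 3 then
      pvShellLoop num_rows num_cols cr cc max_d reserved f (d + 1)
        ((PySem.List.pyRange (max 0 (cr - d)) (min (num_rows - 1) (cr + d) + 1) 1).foldl (fun best r =>
          let k := d - |r - cr|
          (if 0 < k then [cc - k, cc + k] else [cc]).foldl (fun best c =>
            if 0 ≤ c ∧ c < num_cols ∧ ¬ PySem.Set.contains reserved (r, c) then
              best ++ [(r + 1, c + 1)]
            else best) best) best)
    else best

def find_best_seat_alt (num_rows : Int) (num_cols : Int) (reserved_seats : List (Int × Int)) : List (Int × Int) :=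
  if num_rows ≤ 0 ∨ num_cols ≤ 0 then []
  else
    let reserved : PySem.Set (Int × Int) :=
      PySem.Set.ofList (reserved_seats.map (fun rc => (rc.1 - 1, rc.2 - 1)))
    let cr := PySem.Int.floordiv num_rows 2
    let cc := PySem.Int.floordiv num_cols 2
    let max_d := max cr (num_rows - 1 - cr) + max cc (num_cols - 1 - cc)
    -- best[:3] on a list is exactly List.take 3
    (pvShellLoop num_rows num_cols cr cc max_d reserved (max_d + 1).toNat 0 []).take 3

-- ===== PRECONDITION & SPEC =====
def Spec_find_best_seat (num_rows : Int) (num_cols : Int) (reserved_seats : List (Int × Int)) (out : List (Int × Int)) : Prop := out = find_best_seat_alt num_rows num_cols reserved_seats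
instance (num_rows : Int) (num_cols : Int) (reserved_seats : List (Int × Int)) (out : List (Int × Int)) : Decidable (Spec_find_best_seat num_rows num_cols reserved_seats out) := by unfold Spec_find_best_seat; infer_instance

-- ===== CLAIM (what is proved, stated in full; the proofs are below) =====
def Claim_equal_find_best_seat : Prop := ∀ (num_rows : Int) (num_cols : Int) (reserved_seats : List (Int × Int)), Dom_find_best_seat num_rows num_cols reserved_seats → Spec_find_best_seat num_rows num_cols reserved_seats (find_best_seat num_rows num_cols reserved_seats)

-- ===== LEMMAS AND PROOFS =====

-- proof-side vocabulary -------------------------------------------------------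
def pvDist (cr cc : Int) (x : Int × Int) : Int := |x.1 - cr| + |x.2 - cc|
def pvTriple (cr cc : Int) (x : Int × Int) : Int × Int × Int := (pvDist cr cc x, x.1, x.2)
def pvLexLtP (a b : Int × Int × Int) : Prop := pvLexLt a b = true
def pvCellLt (cr cc : Int) (x y : Int × Int) : Prop := pvLexLtP (pvTriple cr cc x) (pvTriple cr cc y)
def pvP (reserved : PySem.Set (Int × Int)) (x : Int × Int) : Bool := !(PySem.Set.contains reserved x)
def pvInc (x : Int × Int) : Int × Int := (x.1 + 1, x.2 + 1)

def pvRows (R cr d : Int) : List Int :=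
  PySem.List.pyRange (max 0 (cr - d)) (min (R - 1) (cr + d) + 1) 1
def pvCols (C cc k : Int) : List Int :=
  (if 0 < k then [cc - k, cc + k] else [cc]).filter (fun c => decide (0 ≤ c ∧ c < C))
def pvShellCells (R C cr cc d : Int) : List (Int × Int) :=
  (pvRows R cr d).flatMap (fun r => (pvCols C cc (d - |r - cr|)).map (fun c => (r, c)))
def pvShells (R C cr cc max_d : Int) : Nat → Int → List (Int × Int)
  | 0, _ => []
  | f + 1, d => if d ≤ max_d then pvShellCells R C cr cc d ++ pvShells R C cr cc max_d f (d + 1) else []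
def pvRM (R C : Int) : List (Int × Int) :=
  (PySem.List.pyRange 0 R 1).flatMap (fun r => (PySem.List.pyRange 0 C 1).map (fun c => (r, c)))

-- generic list helpers --------------------------------------------------------
theorem pvFilter_flatMap {α β : Type} (l : List α) (g : α → List β) (p : β → Bool) :
    (l.flatMap g).filter p = l.flatMap (fun a => (g a).filter p) := by
  induction l with
  | nil => simp
  | cons a t ih => simp [List.flatMap_cons, List.filter_append, ih]

theorem pvPairwise_flatMap {α β : Type} {R : β → β → Prop} (l : List α) (f : α → List β)
    (h1 : ∀ a ∈ l, (f a).Pairwise R)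
    (h2 : l.Pairwise (fun a b => ∀ x ∈ f a, ∀ y ∈ f b, R x y)) :
    (l.flatMap f).Pairwise R := by
  induction l with
  | nil => simp
  | cons a t ih =>
    rw [List.flatMap_cons, List.pairwise_append]
    refine ⟨h1 a (by simp), ih (fun b hb => h1 b (by simp [hb])) h2.of_cons, ?_⟩
    intro x hx y hy
    obtain ⟨b, hb, hyb⟩ := List.mem_flatMap.mp hy
    exact (List.pairwise_cons.mp h2).1 b hb x hx y hyb

-- the lexicographic order ------------------------------------------------------

theorem pvLexLt_trans {a b c : Int × Int × Int} (h1 : pvLexLtP a b) (h2 : pvLexLtP b c) : pvLexLtP a c := by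
  simp [pvLexLtP, pvLexLt] at *; omega

theorem pvLexLt_irrefl (a : Int × Int × Int) : ¬ pvLexLtP a a := by
  simp [pvLexLtP, pvLexLt]

theorem pvLexLt_total {a b : Int × Int × Int} (h : ¬ pvLexLtP a b) : a = b ∨ pvLexLtP b a := by
  obtain ⟨a1, a2, a3⟩ := a; obtain ⟨b1, b2, b3⟩ := b
  simp [pvLexLtP, pvLexLt, Prod.ext_iff] at *; omega

theorem pvFoldMin_mem (x : Int × Int × Int) (xs : List (Int × Int × Int)) :
    xs.foldl (fun m y => if pvLexLt y m then y else m) x ∈ x :: xs := by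
  induction xs generalizing x with
  | nil => simp
  | cons y t ih =>
    rw [List.foldl_cons]
    have h := ih (if pvLexLt y x then y else x)
    rw [List.mem_cons] at h
    rcases h with h | h
    · by_cases hc : pvLexLt y x <;>
        simp only [hc, ite_true, Bool.false_eq_true, ite_false] at h ⊢ <;> simp [h]
    · simp [h]

theorem pvFoldMin_not_lt (x : Int × Int × Int) (xs : List (Int × Int × Int)) :
    ∀ w ∈ x :: xs, ¬ pvLexLtP w (xs.foldl (fun m y => if pvLexLt y m then y else m) x) := by
  induction xs generalizing x with
  | nil => intro w hw; simp at hw; subst hw; exact pvLexLt_irrefl _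
  | cons y t ih =>
    intro w hw
    rw [List.foldl_cons]
    have hzy : ¬ pvLexLtP y (t.foldl (fun m y => if pvLexLt y m then y else m) (if pvLexLt y x then y else x)) := by
      by_cases hc : pvLexLt y x
      · simpa [hc] using ih (if pvLexLt y x then y else x) y (by simp [hc])
      · have hx := ih (if pvLexLt y x then y else x) x (by simp [hc])
        simp only [hc, if_neg, Bool.false_eq_true, ite_false] at hx ⊢
        intro hcon
        rcases pvLexLt_total (fun h => hc h) with heq | hxy
        · exact hx (heq ▸ hcon)
        · exact hx (pvLexLt_trans hxy hcon)
    have hzx : ¬ pvLexLtP x (t.foldl (fun m y => if pvLexLt y m then y else m) (if pvLexLt y x then y else x)) := by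
      by_cases hc : pvLexLt y x
      · simp only [hc, ite_true] at hzy ⊢
        intro hcon
        exact hzy (pvLexLt_trans (show pvLexLtP y x from hc) hcon)
      · simpa [hc] using ih (if pvLexLt y x then y else x) x (by simp [hc])
    rw [List.mem_cons] at hw
    rcases hw with rfl | hw
    · exact hzx
    · rw [List.mem_cons] at hw
      rcases hw with rfl | hw
      · exact hzy
      · exact ih (if pvLexLt y x then y else x) w (by simp [hw])

theorem pvHeapPop_eq_min (h : List (Int × Int × Int)) (m : Int × Int × Int)
    (s' : List (Int × Int × Int)) (hperm : h.Perm (m :: s'))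
    (hp : (m :: s').Pairwise pvLexLtP) :
    pvHeapPop h = some (m, h.erase m) := by
  match h with
  | [] => exact absurd hperm.symm (by simp)
  | x :: xs =>
    have hq := pvFoldMin_mem x xs
    have hq2 := hperm.mem_iff.mp hq
    have hm : m ∈ x :: xs := hperm.mem_iff.mpr (by simp)
    have hqm : xs.foldl (fun m y => if pvLexLt y m then y else m) x = m := by
      rw [List.mem_cons] at hq2
      rcases hq2 with h | h
      · exact h
      · exact absurd ((List.pairwise_cons.mp hp).1 _ h) (pvFoldMin_not_lt x xs m hm)
    simp only [pvHeapPop, hqm]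

theorem pvPopLoop_eq (f : Nat) (best : List (Int × Int)) (h s : List (Int × Int × Int))
    (hperm : h.Perm s) (hp : s.Pairwise pvLexLtP) :
    pvPopLoop f best h = best ++ (s.take (min f (3 - best.length))).map (fun m => (m.2.1, m.2.2)) := by
  induction f generalizing best h s with
  | zero => simp [pvPopLoop]
  | succ f ih =>
    by_cases hb : best.length < 3
    · match s with
      | [] =>
        have : h = [] := hperm.eq_nil
        subst this
        simp [pvPopLoop, pvHeapPop, hb]
      | m :: s' =>
        have hpop := pvHeapPop_eq_min h m s' hperm hp
        have hperm' : (h.erase m).Perm s' := by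
          have := hperm.erase m
          rwa [List.erase_cons_head] at this
        have := ih (best ++ [(m.2.1, m.2.2)]) (h.erase m) s' hperm' hp.of_cons
        rw [pvPopLoop, if_pos hb, hpop]
        show pvPopLoop f (best ++ [(m.2.1, m.2.2)]) (h.erase m) = _
        rw [this]
        have hmin : min (f + 1) (3 - best.length) = (min f (3 - (best ++ [(m.2.1, m.2.2)]).length)) + 1 := by
          simp; omega
        rw [hmin, List.take_succ_cons]
        simp
    · rw [pvPopLoop, if_neg hb]
      have : 3 - best.length = 0 := by omega
      simp [this]

theorem pvHeapBuild (R C cr cc : Int) (reserved : PySem.Set (Int × Int)) :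
    (PySem.List.pyRange 0 R 1).foldl (fun heap r =>
      (PySem.List.pyRange 0 C 1).foldl (fun heap c =>
        if PySem.Set.contains reserved (r, c) then heap
        else heap ++ [(|r - cr| + |c - cc|, r, c)]) heap) []
    = ((pvRM R C).filter (pvP reserved)).map (pvTriple cr cc) := by
  have hinner : ∀ (r : Int) (heap : List (Int × Int × Int)),
      (PySem.List.pyRange 0 C 1).foldl (fun heap c =>
        if PySem.Set.contains reserved (r, c) then heap
        else heap ++ [(|r - cr| + |c - cc|, r, c)]) heap
      = heap ++ (((PySem.List.pyRange 0 C 1).filter (fun c => pvP reserved (r, c))).map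
          (fun c => pvTriple cr cc (r, c))) := by
    intro r heap
    rw [show (fun (heap : List (Int × Int × Int)) (c : Int) =>
        if PySem.Set.contains reserved (r, c) then heap
        else heap ++ [(|r - cr| + |c - cc|, r, c)])
      = (fun heap c => if pvP reserved (r, c) then heap ++ [pvTriple cr cc (r, c)] else heap) from ?_]
    · exact PySem.List.foldl_append_if _ _ _ _
    · funext heap c
      by_cases hc : PySem.Set.contains reserved (r, c) <;>
        simp [hc, pvP, pvTriple, pvDist] <;> rfl
  calc (PySem.List.pyRange 0 R 1).foldl (fun heap r =>
      (PySem.List.pyRange 0 C 1).foldl (fun heap c =>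
        if PySem.Set.contains reserved (r, c) then heap
        else heap ++ [(|r - cr| + |c - cc|, r, c)]) heap) []
      = (PySem.List.pyRange 0 R 1).foldl (fun heap r => heap ++
          (((PySem.List.pyRange 0 C 1).filter (fun c => pvP reserved (r, c))).map
            (fun c => pvTriple cr cc (r, c)))) [] := by
        have hfun : (fun (heap : List (Int × Int × Int)) (r : Int) =>
            (PySem.List.pyRange 0 C 1).foldl (fun heap c =>
              if PySem.Set.contains reserved (r, c) then heap
              else heap ++ [(|r - cr| + |c - cc|, r, c)]) heap)
          = (fun heap r => heap ++
              (((PySem.List.pyRange 0 C 1).filter (fun c => pvP reserved (r, c))).map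
                (fun c => pvTriple cr cc (r, c)))) := by
          funext heap r; exact hinner r heap
        rw [hfun]
    _ = (PySem.List.pyRange 0 R 1).flatMap (fun r =>
          ((PySem.List.pyRange 0 C 1).filter (fun c => pvP reserved (r, c))).map
            (fun c => pvTriple cr cc (r, c))) := by
        rw [PySem.List.foldl_append_eq_flatMap]; simp
    _ = ((pvRM R C).filter (pvP reserved)).map (pvTriple cr cc) := by
        rw [pvRM, pvFilter_flatMap, List.map_flatMap]
        congr 1; funext r
        rw [List.filter_map, List.map_map]
        rfl

theorem pvShellFold (R C cr cc d : Int) (reserved : PySem.Set (Int × Int)) (best : List (Int × Int)) :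
    (PySem.List.pyRange (max 0 (cr - d)) (min (R - 1) (cr + d) + 1) 1).foldl (fun best r =>
      let k := d - |r - cr|
      (if 0 < k then [cc - k, cc + k] else [cc]).foldl (fun best c =>
        if 0 ≤ c ∧ c < C ∧ ¬ PySem.Set.contains reserved (r, c) then
          best ++ [(r + 1, c + 1)]
        else best) best) best
    = best ++ ((pvShellCells R C cr cc d).filter (pvP reserved)).map pvInc := by
  have hcols : ∀ r : Int,
      ((if 0 < d - |r - cr| then [cc - (d - |r - cr|), cc + (d - |r - cr|)] else [cc]).filter
        (fun c => decide (0 ≤ c ∧ c < C ∧ ¬ PySem.Set.contains reserved (r, c) = true)))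
      = (pvCols C cc (d - |r - cr|)).filter (fun c => pvP reserved (r, c)) := by
    intro r
    rw [pvCols, List.filter_filter]
    refine List.filter_congr (fun c _ => ?_)
    by_cases h : PySem.Set.contains reserved (r, c) <;> simp [h, pvP, Bool.and_comm, Bool.and_left_comm, Bool.and_assoc]
  have hinner : ∀ (r : Int) (best : List (Int × Int)),
      (let k := d - |r - cr|
      (if 0 < k then [cc - k, cc + k] else [cc]).foldl (fun best c =>
        if 0 ≤ c ∧ c < C ∧ ¬ PySem.Set.contains reserved (r, c) then
          best ++ [(r + 1, c + 1)]
        else best) best)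
      = best ++ ((pvCols C cc (d - |r - cr|)).filter (fun c => pvP reserved (r, c))).map
          (fun c => (r + 1, c + 1)) := by
    intro r best
    show (if 0 < d - |r - cr| then [cc - (d - |r - cr|), cc + (d - |r - cr|)] else [cc]).foldl _ best = _
    rw [PySem.List.foldl_append_ite
      (p := fun c => 0 ≤ c ∧ c < C ∧ ¬ PySem.Set.contains reserved (r, c) = true)
      (f := fun c => (r + 1, c + 1)), hcols r]
  have hfun : (fun (best : List (Int × Int)) (r : Int) =>
      let k := d - |r - cr|
      (if 0 < k then [cc - k, cc + k] else [cc]).foldl (fun best c =>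
        if 0 ≤ c ∧ c < C ∧ ¬ PySem.Set.contains reserved (r, c) then
          best ++ [(r + 1, c + 1)]
        else best) best)
      = (fun best r => best ++ ((pvCols C cc (d - |r - cr|)).filter (fun c => pvP reserved (r, c))).map
          (fun c => (r + 1, c + 1))) := by
    funext best r; exact hinner r best
  rw [hfun, PySem.List.foldl_append_eq_flatMap]
  congr 1
  rw [pvShellCells, pvFilter_flatMap, List.map_flatMap]
  congr 1; funext r
  rw [List.filter_map, List.map_map]
  rfl

theorem pvShellLoop_take (R C cr cc max_d : Int) (reserved : PySem.Set (Int × Int)) :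
    ∀ (f : Nat) (d : Int) (best : List (Int × Int)),
    (pvShellLoop R C cr cc max_d reserved f d best).take 3
    = (best ++ ((pvShells R C cr cc max_d f d).filter (pvP reserved)).map pvInc).take 3 := by
  intro f
  induction f with
  | zero => intro d best; simp [pvShellLoop, pvShells]
  | succ f ih =>
    intro d best
    by_cases h1 : d ≤ max_d
    · by_cases h2 : best.length < 3
      · rw [pvShellLoop, if_pos ⟨h1, h2⟩, ih, pvShellFold R C cr cc d reserved best]
        rw [pvShells, if_pos h1]
        simp [List.filter_append, List.append_assoc]
      · rw [pvShellLoop, if_neg (by tauto), pvShells, if_pos h1]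
        rw [List.take_append_of_le_length (by omega)]
    · rw [pvShellLoop, if_neg (by tauto), pvShells, if_neg h1]
      simp

theorem pvMem_shellCells (R C cr cc d : Int) (x : Int × Int) :
    x ∈ pvShellCells R C cr cc d ↔
      (0 ≤ x.1 ∧ x.1 < R ∧ 0 ≤ x.2 ∧ x.2 < C ∧ pvDist cr cc x = d) := by
  obtain ⟨a, b⟩ := x
  simp only [pvShellCells, pvRows, pvCols, List.mem_flatMap, List.mem_map, List.mem_filter,
    PySem.List.mem_pyRange_one, pvDist, Prod.mk.injEq, decide_eq_true_eq, max_le_iff,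
    Int.lt_add_one_iff, le_min_iff]
  constructor
  · rintro ⟨r, hr, c, ⟨hcm, hcb⟩, rfl, rfl⟩
    split_ifs at hcm with hk <;> simp only [List.mem_cons, List.not_mem_nil, or_false] at hcm
    · rcases hcm with rfl | rfl <;> (simp only [Int.abs_eq_natAbs] at *; omega)
    · subst hcm
      simp only [Int.abs_eq_natAbs] at *; omega
  · rintro ⟨ha1, ha2, hb1, hb2, hd⟩
    refine ⟨a, ?_, b, ⟨?_, hb1, hb2⟩, rfl, rfl⟩
    · simp only [Int.abs_eq_natAbs] at *; omega
    · split_ifs with hk <;> simp only [List.mem_cons, List.not_mem_nil, or_false] <;> (simp only [Int.abs_eq_natAbs] at *; omega)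

theorem pvMem_shells (R C cr cc max_d : Int) :
    ∀ (f : Nat) (d : Int) (x : Int × Int),
    x ∈ pvShells R C cr cc max_d f d ↔
      (0 ≤ x.1 ∧ x.1 < R ∧ 0 ≤ x.2 ∧ x.2 < C ∧ d ≤ pvDist cr cc x ∧
        pvDist cr cc x ≤ max_d ∧ pvDist cr cc x < d + (f : Int)) := by
  intro f
  induction f with
  | zero => intro d x; simp [pvShells]; omega
  | succ f ih =>
    intro d x
    rw [pvShells]
    split_ifs with h1
    · rw [List.mem_append, pvMem_shellCells, ih]
      push_cast
      constructor
      · rintro (⟨h, h2, h3, h4, h5⟩ | ⟨h, h2, h3, h4, h5, h6, h7⟩) <;> exact ⟨h, h2, h3, h4, by omega, by omega, by omega⟩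
      · rintro ⟨h, h2, h3, h4, h5, h6, h7⟩
        by_cases hd : pvDist cr cc x = d
        · exact Or.inl ⟨h, h2, h3, h4, hd⟩
        · exact Or.inr ⟨h, h2, h3, h4, by omega, by omega, by omega⟩
    · simp; omega

theorem pvNodup_shellCells (R C cr cc d : Int) : (pvShellCells R C cr cc d).Nodup := by
  rw [pvShellCells, List.nodup_flatMap]
  constructor
  · intro r _
    refine List.Nodup.map (fun c c' h => by simpa using congrArg Prod.snd h) ?_
    rw [pvCols]
    refine List.Nodup.filter _ ?_
    split_ifs with hk
    · simp; omega
    · simp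
  · have := PySem.List.pairwise_lt_pyRange_one (a := max 0 (cr - d)) (b := min (R - 1) (cr + d) + 1)
    rw [pvRows]
    refine this.imp ?_
    intro r r' hrr
    simp only [Function.onFun, List.Disjoint]
    rintro ⟨a, b⟩ ha hb
    simp only [List.mem_map] at ha hb
    obtain ⟨c, _, hc⟩ := ha
    obtain ⟨c', _, hc'⟩ := hb
    have : r = a := (Prod.mk.injEq _ _ _ _).mp hc |>.1
    have : r' = a := (Prod.mk.injEq _ _ _ _).mp hc' |>.1
    omega

theorem pvNodup_shells (R C cr cc max_d : Int) :
    ∀ (f : Nat) (d : Int), (pvShells R C cr cc max_d f d).Nodup := by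
  intro f
  induction f with
  | zero => intro d; simp [pvShells]
  | succ f ih =>
    intro d
    rw [pvShells]
    split_ifs with h1
    · refine (pvNodup_shellCells R C cr cc d).append (ih (d + 1)) ?_
      intro x hx hx'
      rw [pvMem_shellCells] at hx
      rw [pvMem_shells] at hx'
      omega
    · simp

theorem pvCellLt_of_rc (cr cc : Int) (x y : Int × Int) (hd : pvDist cr cc x = pvDist cr cc y)
    (h : x.1 < y.1 ∨ (x.1 = y.1 ∧ x.2 < y.2)) : pvCellLt cr cc x y := by
  simp only [pvCellLt, pvLexLtP, pvLexLt, pvTriple, decide_eq_true_eq]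
  omega

theorem pvCellLt_of_dist (cr cc : Int) (x y : Int × Int) (hd : pvDist cr cc x < pvDist cr cc y) :
    pvCellLt cr cc x y := by
  simp only [pvCellLt, pvLexLtP, pvLexLt, pvTriple, decide_eq_true_eq]
  omega

theorem pvPairwise_shellCells (R C cr cc d : Int) :
    (pvShellCells R C cr cc d).Pairwise (pvCellLt cr cc) := by
  have hmem : ∀ r ∈ pvRows R cr d, ∀ c ∈ pvCols C cc (d - |r - cr|),
      pvDist cr cc (r, c) = d ∧ 0 ≤ r ∧ r < R := by
    intro r hr c hc
    have hx : (r, c) ∈ pvShellCells R C cr cc d := by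
      rw [pvShellCells]
      exact List.mem_flatMap.mpr ⟨r, hr, List.mem_map.mpr ⟨c, hc, rfl⟩⟩
    have := (pvMem_shellCells R C cr cc d (r, c)).mp hx
    exact ⟨this.2.2.2.2, this.1, this.2.1⟩
  rw [pvShellCells]
  refine pvPairwise_flatMap _ _ ?_ ?_
  · intro r hr
    rw [List.pairwise_map]
    have hp : (pvCols C cc (d - |r - cr|)).Pairwise (· < ·) := by
      rw [pvCols]
      refine List.Pairwise.filter _ ?_
      split_ifs with hk
      · simp; omega
      · simp
    refine List.Pairwise.imp_of_mem ?_ hp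
    intro c c' hcm hcm' hlt
    obtain ⟨hd1, _, _⟩ := hmem r hr c hcm
    obtain ⟨hd2, _, _⟩ := hmem r hr c' hcm'
    exact pvCellLt_of_rc cr cc (r, c) (r, c') (by rw [hd1, hd2]) (Or.inr ⟨rfl, hlt⟩)
  · have hrows : (pvRows R cr d).Pairwise (· < ·) := by
      rw [pvRows]; exact PySem.List.pairwise_lt_pyRange_one _ _
    refine List.Pairwise.imp_of_mem ?_ hrows
    intro r r' hrm hrm' hlt
    rintro ⟨a, b⟩ ha ⟨a', b'⟩ hb
    simp only [List.mem_map] at ha hb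
    obtain ⟨c, hcm, hc⟩ := ha
    obtain ⟨c', hcm', hc'⟩ := hb
    obtain ⟨rfl, rfl⟩ := Prod.mk.injEq .. |>.mp hc
    obtain ⟨rfl, rfl⟩ := Prod.mk.injEq .. |>.mp hc'
    obtain ⟨hd1, _, _⟩ := hmem r hrm c hcm
    obtain ⟨hd2, _, _⟩ := hmem r' hrm' c' hcm'
    exact pvCellLt_of_rc cr cc (r, c) (r', c') (by rw [hd1, hd2]) (Or.inl hlt)

theorem pvPairwise_shells (R C cr cc max_d : Int) :
    ∀ (f : Nat) (d : Int), (pvShells R C cr cc max_d f d).Pairwise (pvCellLt cr cc) := by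
  intro f
  induction f with
  | zero => intro d; simp [pvShells]
  | succ f ih =>
    intro d
    rw [pvShells]
    split_ifs with h1
    · rw [List.pairwise_append]
      refine ⟨pvPairwise_shellCells R C cr cc d, ih (d + 1), ?_⟩
      intro x hx y hy
      rw [pvMem_shellCells] at hx
      rw [pvMem_shells] at hy
      exact pvCellLt_of_dist cr cc x y (by omega)
    · simp

theorem pvMem_RM (R C : Int) (x : Int × Int) :
    x ∈ pvRM R C ↔ (0 ≤ x.1 ∧ x.1 < R ∧ 0 ≤ x.2 ∧ x.2 < C) := by
  obtain ⟨a, b⟩ := x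
  simp only [pvRM, List.mem_flatMap, List.mem_map, PySem.List.mem_pyRange_one, Prod.mk.injEq]
  constructor
  · rintro ⟨r, hr, c, hc, rfl, rfl⟩
    exact ⟨hr.1, hr.2, hc.1, hc.2⟩
  · rintro ⟨h1, h2, h3, h4⟩
    exact ⟨a, ⟨h1, h2⟩, b, ⟨h3, h4⟩, rfl, rfl⟩

theorem pvNodup_RM (R C : Int) : (pvRM R C).Nodup := by
  rw [pvRM, List.nodup_flatMap]
  constructor
  · intro r _
    exact List.Nodup.map (fun c c' h => by simpa using congrArg Prod.snd h)
      (PySem.List.nodup_pyRange_one _ _)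
  · refine (PySem.List.pairwise_lt_pyRange_one _ _).imp ?_
    intro r r' hrr
    simp only [Function.onFun, List.Disjoint]
    rintro ⟨a, b⟩ ha hb
    simp only [List.mem_map] at ha hb
    obtain ⟨c, _, hc⟩ := ha
    obtain ⟨c', _, hc'⟩ := hb
    have h1 : r = a := (Prod.mk.injEq _ _ _ _).mp hc |>.1
    have h2 : r' = a := (Prod.mk.injEq _ _ _ _).mp hc' |>.1
    omega

theorem pvDist_nonneg (cr cc : Int) (x : Int × Int) : 0 ≤ pvDist cr cc x := by
  simp only [pvDist, Int.abs_eq_natAbs]; omega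

theorem pvRM_perm_shells (R C cr cc max_d : Int)
    (hd : ∀ x : Int × Int, 0 ≤ x.1 → x.1 < R → 0 ≤ x.2 → x.2 < C → pvDist cr cc x ≤ max_d)
    (hF : (((max_d + 1).toNat : Nat) : Int) = max_d + 1) :
    (pvRM R C).Perm (pvShells R C cr cc max_d (max_d + 1).toNat 0) := by
  rw [List.perm_ext_iff_of_nodup (pvNodup_RM R C) (pvNodup_shells R C cr cc max_d _ 0)]
  intro x
  rw [pvMem_RM, pvMem_shells, hF]
  constructor
  · rintro ⟨h1, h2, h3, h4⟩
    exact ⟨h1, h2, h3, h4, pvDist_nonneg cr cc x, hd x h1 h2 h3 h4, by have := hd x h1 h2 h3 h4; omega⟩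
  · rintro ⟨h1, h2, h3, h4, _⟩
    exact ⟨h1, h2, h3, h4⟩

-- main equivalence -------------------------------------------------------------
theorem pvMain (R C : Int) (res : List (Int × Int)) :
    find_best_seat R C res = find_best_seat_alt R C res := by
  by_cases hdeg : R ≤ 0 ∨ C ≤ 0
  · rw [find_best_seat_alt]
    rw [if_pos hdeg]
    show (pvPopLoop 3 [] _).map _ = []
    have hnil : (PySem.List.pyRange 0 R 1).foldl (fun heap r =>
        (PySem.List.pyRange 0 C 1).foldl (fun heap c =>
          if PySem.Set.contains (PySem.Set.ofList (res.map (fun rc => (rc.1 - 1, rc.2 - 1)))) (r, c) then heap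
          else heap ++ [(|r - PySem.Int.floordiv R 2| + |c - PySem.Int.floordiv C 2|, r, c)]) heap) []
        = [] := by
      rcases hdeg with h | h
      · rw [PySem.List.pyRange_one_eq_nil h]
        rfl
      · rw [PySem.List.pyRange_one_eq_nil h]
        exact List.foldl_fixed _
    rw [hnil]
    rfl
  · push Not at hdeg
    rw [find_best_seat_alt, if_neg (by omega)]
    show (pvPopLoop 3 [] _).map _ = _
    have h1 : 0 ≤ max (PySem.Int.floordiv R 2) (R - 1 - PySem.Int.floordiv R 2) :=
      le_max_iff.mpr (by omega)
    have h2 : 0 ≤ max (PySem.Int.floordiv C 2) (C - 1 - PySem.Int.floordiv C 2) :=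
      le_max_iff.mpr (by omega)
    -- abbreviations
    generalize hcr : PySem.Int.floordiv R 2 = cr at *
    generalize hcc : PySem.Int.floordiv C 2 = cc at *
    generalize hres : PySem.Set.ofList (res.map (fun rc => (rc.1 - 1, rc.2 - 1))) = reserved
    have hmd : 0 ≤ max cr (R - 1 - cr) + max cc (C - 1 - cc) := by omega
    have hF : ((((max cr (R - 1 - cr) + max cc (C - 1 - cc)) + 1).toNat : Nat) : Int)
        = (max cr (R - 1 - cr) + max cc (C - 1 - cc)) + 1 := Int.toNat_of_nonneg (by omega)
    have hbound : ∀ x : Int × Int, 0 ≤ x.1 → x.1 < R → 0 ≤ x.2 → x.2 < C →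
        pvDist cr cc x ≤ max cr (R - 1 - cr) + max cc (C - 1 - cc) := by
      intro x hx1 hx2 hx3 hx4
      have ha1 : cr ≤ max cr (R - 1 - cr) := le_max_left _ _
      have ha2 : R - 1 - cr ≤ max cr (R - 1 - cr) := le_max_right _ _
      have hb1 : cc ≤ max cc (C - 1 - cc) := le_max_left _ _
      have hb2 : C - 1 - cc ≤ max cc (C - 1 - cc) := le_max_right _ _
      simp only [pvDist, Int.abs_eq_natAbs]
      omega
    rw [pvHeapBuild R C cr cc reserved]
    have hperm : (((pvRM R C).filter (pvP reserved)).map (pvTriple cr cc)).Perm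
        ((((pvShells R C cr cc (max cr (R - 1 - cr) + max cc (C - 1 - cc))
            ((max cr (R - 1 - cr) + max cc (C - 1 - cc)) + 1).toNat 0)).filter (pvP reserved)).map (pvTriple cr cc)) :=
      ((pvRM_perm_shells R C cr cc _ hbound hF).filter _).map _
    have hpair : (((pvShells R C cr cc (max cr (R - 1 - cr) + max cc (C - 1 - cc))
        ((max cr (R - 1 - cr) + max cc (C - 1 - cc)) + 1).toNat 0).filter (pvP reserved)).map (pvTriple cr cc)).Pairwise pvLexLtP :=
      List.pairwise_map.mpr ((pvPairwise_shells R C cr cc _ _ 0).filter _)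
    rw [pvPopLoop_eq 3 [] _ _ hperm hpair]
    rw [pvShellLoop_take R C cr cc _ reserved _ 0 []]
    simp only [List.nil_append, List.length_nil, Nat.sub_zero, Nat.min_self, List.map_take,
      List.map_map]
    have hfn : ((fun rc : Int × Int => (rc.1 + 1, rc.2 + 1)) ∘
        (fun m : Int × Int × Int => (m.2.1, m.2.2)) ∘ pvTriple cr cc) = pvInc := by
      funext x; simp [pvTriple, pvInc]
    rw [hfn]

-- ===== VERDICT (by name: the statement is the Claim_ definition above) =====
theorem find_best_seat_spec : Claim_equal_find_best_seat := by
  intro num_rows num_cols reserved_seats _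
  exact pvMain num_rows num_cols reserved_seats
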